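-- pv_equiv track=rewrite | github.com/hiteshpindikanti/Coding_Questions | backtracking.py | get_all_sequences_len_k
-- ===== SOURCE A (Python) =====
-- def get_all_sequences_len_k(word: str, k: int) -> list[str]:
--     if not k:
--         return [""]
--     all_sequences_len_k = []
--     seen = set()
--     for index, ch in enumerate(word):
--         if ch not in seen:
--             seen.add(ch)
--             remaining_word = word[:index] + word[index + 1:]
--             remaining_seq = get_all_sequences_len_k(remaining_word, k - 1)
--             all_sequences_len_k.extend(list(map(lambda x: ch + x, remaining_seq)))
--     return all_sequences_len_k
-- ===== SOURCE B (Python) =====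
-- def get_all_sequences_len_k(word: str, k: int) -> list[str]:
--     # Iterative level-by-level BFS instead of A's recursion: each round expands
--     # every pending (prefix, remaining) state by its first-occurrence characters.
--     states = [("", word)]
--     k_left = k
--     while k_left != 0 and states:
--         nxt = []
--         for prefix, rem in states:
--             seen = set()
--             for i, ch in enumerate(rem):
--                 if ch not in seen:
--                     seen.add(ch)
--                     nxt.append((prefix + ch, rem[:i] + rem[i + 1:]))
--         states = nxt
--         k_left -= 1
--     return [p for p, _ in states] if k_left == 0 else []
-- ===== Notes on version B (the rewrite author's own statement) =====
-- stated objective: alternative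
-- what changed: Replaces A's DFS recursion by an iterative level-by-level BFS: a worklist of (prefix, remaining) states is expanded one depth per round until the counter reaches 0 or the worklist drains, so k==0, negative k and k>len(word) fall out of the loop condition naturally.
import Mathlib
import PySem

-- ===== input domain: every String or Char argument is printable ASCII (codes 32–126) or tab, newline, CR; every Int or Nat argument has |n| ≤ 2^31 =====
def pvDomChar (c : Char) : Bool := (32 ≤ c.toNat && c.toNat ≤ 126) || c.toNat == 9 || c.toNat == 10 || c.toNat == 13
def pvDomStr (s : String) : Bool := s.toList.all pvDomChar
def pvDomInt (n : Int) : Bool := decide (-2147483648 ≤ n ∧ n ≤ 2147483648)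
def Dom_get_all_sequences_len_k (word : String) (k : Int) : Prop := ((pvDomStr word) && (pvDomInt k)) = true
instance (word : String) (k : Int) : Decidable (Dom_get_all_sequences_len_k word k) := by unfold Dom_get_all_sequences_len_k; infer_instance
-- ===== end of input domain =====

-- B replaces A's DFS recursion by an iterative level-by-level worklist expansion (same results, same order; no speed claim).

-- ===== PORT A =====
-- A's for-loop over enumerate(word) is the inner recursion pvAGo: `pre` is word[:index]
-- (the characters already passed), `rest` the suffix from index on, so
-- `remaining_word = word[:index] + word[index+1:]` is exactly `pre ++ rest'`.
-- size bounds cited by the mutual recursion's decreasing_by (A recurses on a word one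
-- character shorter; the loop walks the rest of the word)
lemma pvDecA (word : String) :
    (List.length ([] : List Char) + word.toList.length + 1) ^ 2 + word.toList.length
      < (word.toList.length + 1) ^ 2 + word.toList.length + 1 := by
  simp only [List.length_nil]
  nlinarith [word.toList.length]
lemma pvDecStep (pre rest' : List Char) (ch : Char) :
    ((pre ++ [ch]).length + rest'.length + 1) ^ 2 + rest'.length
      < (pre.length + (ch :: rest').length + 1) ^ 2 + (ch :: rest').length := by
  simp only [List.length_append, List.length_cons, List.length_nil]
  nlinarith [pre.length, rest'.length]
lemma pvDecCall (pre rest' : List Char) (ch : Char) :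
    ((String.ofList (pre ++ rest')).toList.length + 1) ^ 2
        + (String.ofList (pre ++ rest')).toList.length + 1
      < (pre.length + (ch :: rest').length + 1) ^ 2 + (ch :: rest').length := by
  simp only [String.toList_ofList, List.length_append, List.length_cons]
  nlinarith [pre.length, rest'.length]

mutual
def get_all_sequences_len_k (word : String) (k : Int) : List String :=
  if k = 0 then [""]
  else pvAGo k [] word.toList PySem.Set.empty []
termination_by (word.toList.length + 1) ^ 2 + word.toList.length + 1
decreasing_by exact pvDecA word

def pvAGo : Int → List Char → List Char → PySem.Set Char → List String → List String
  | _, _, [], _, acc => acc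
  | k, pre, ch :: rest', seen, acc =>
    if PySem.Set.contains seen ch then pvAGo k (pre ++ [ch]) rest' seen acc
    else
      pvAGo k (pre ++ [ch]) rest' (PySem.Set.add seen ch)
        (acc ++ (get_all_sequences_len_k (String.ofList (pre ++ rest')) (k - 1)).map
          (fun x => String.ofList (ch :: x.toList)))
termination_by _ pre rest _ _ => (pre.length + rest.length + 1) ^ 2 + rest.length
decreasing_by
  all_goals first
    | exact pvDecStep pre rest' ch
    | exact pvDecCall pre rest' ch
end

-- ===== PORT B =====
-- the inner `for i, ch in enumerate(rem)` loop of Source B; `pre`/`rest'` play the roles of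
-- rem[:i] and rem[i+1:], so the pushed state is (prefix + ch, rem[:i] + rem[i+1:])
def pvExpandGo (p : String) (pre rest : List Char) (seen : PySem.Set Char)
    (acc : List (String × String)) : List (String × String) :=
  match rest with
  | [] => acc
  | ch :: rest' =>
    if PySem.Set.contains seen ch then pvExpandGo p (pre ++ [ch]) rest' seen acc
    else
      pvExpandGo p (pre ++ [ch]) rest' (PySem.Set.add seen ch)
        (acc ++ [(String.ofList (p.toList ++ [ch]), String.ofList (pre ++ rest'))])

-- one round of the while loop: build nxt by scanning every pending state
def pvExpandAll (states : List (String × String)) : List (String × String) :=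
  states.foldl (fun acc s => pvExpandGo s.1 [] s.2.toList PySem.Set.empty acc) []

-- termination measure of the while loop: 1 + the largest remaining-word length, 0 on []
def pvMaxRem (states : List (String × String)) : Nat :=
  states.foldr (fun s m => max (s.2.toList.length + 1) m) 0

lemma pvExpandGo_mem {p : String} {pre rest : List Char} {seen : PySem.Set Char}
    {acc : List (String × String)} {s' : String × String}
    (h : s' ∈ pvExpandGo p pre rest seen acc) :
    s' ∈ acc ∨ s'.2.toList.length + 1 ≤ pre.length + rest.length := by
  induction rest generalizing pre seen acc with
  | nil => exact Or.inl (by simpa [pvExpandGo] using h)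
  | cons ch rest' ih =>
    rw [pvExpandGo] at h
    split at h
    · rcases ih h with h' | h'
      · exact Or.inl h'
      · right; simp at h' ⊢; omega
    · rcases ih h with h' | h'
      · rcases List.mem_append.1 h' with h'' | h''
        · exact Or.inl h''
        · right
          simp only [List.mem_singleton] at h''
          subst h''
          simp only [String.toList_ofList, List.length_append, List.length_cons]
          omega
      · right; simp at h' ⊢; omega

lemma pvExpandAll_mem {states : List (String × String)} {s' : String × String}
    (h : s' ∈ pvExpandAll states) :
    ∃ s ∈ states, s'.2.toList.length + 1 ≤ s.2.toList.length := by
  suffices H : ∀ (l : List (String × String)) (acc : List (String × String)),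
      s' ∈ l.foldl (fun acc s => pvExpandGo s.1 [] s.2.toList PySem.Set.empty acc) acc →
      s' ∈ acc ∨ ∃ s ∈ l, s'.2.toList.length + 1 ≤ s.2.toList.length by
    rcases H states [] h with h' | h'
    · simp at h'
    · exact h'
  intro l
  induction l with
  | nil => intro acc h'; exact Or.inl (by simpa using h')
  | cons s l ih =>
    intro acc h'
    rcases ih _ h' with h'' | h''
    · rcases pvExpandGo_mem h'' with h3 | h3
      · exact Or.inl h3
      · exact Or.inr ⟨s, by simp, by simpa using h3⟩
    · rcases h'' with ⟨t, ht, hle⟩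
      exact Or.inr ⟨t, by simp [ht], hle⟩

lemma pvMaxRem_mem_le {states : List (String × String)} {s : String × String}
    (h : s ∈ states) : s.2.toList.length + 1 ≤ pvMaxRem states := by
  induction states with
  | nil => simp at h
  | cons t l ih =>
    rcases List.mem_cons.1 h with h' | h'
    · subst h'
      simp only [pvMaxRem, List.foldr_cons]
      exact le_max_left _ _
    · simp only [pvMaxRem, List.foldr_cons] at ih ⊢
      exact le_trans (ih h') (le_max_right _ _)

lemma pvMaxRem_lt_of_forall {l : List (String × String)} {c : Nat}
    (hc : 0 < c) (h : ∀ s ∈ l, s.2.toList.length + 1 < c) : pvMaxRem l < c := by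
  induction l with
  | nil => simpa [pvMaxRem] using hc
  | cons s l ih =>
    simp only [pvMaxRem, List.foldr_cons] at ih ⊢
    have h1 := h s (by simp)
    have h2 := ih (fun t ht => h t (by simp [ht]))
    exact Nat.max_lt.2 ⟨h1, h2⟩

-- cited by pvBLoop's decreasing_by: each round strictly shrinks the measure
lemma pvMaxRem_expand_lt {states : List (String × String)} (hne : states ≠ []) :
    pvMaxRem (pvExpandAll states) < pvMaxRem states := by
  obtain ⟨s0, l0, rfl⟩ := List.exists_cons_of_ne_nil hne
  have hpos : 0 < pvMaxRem (s0 :: l0) := by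
    have := pvMaxRem_mem_le (s := s0) (states := s0 :: l0) (by simp)
    omega
  apply pvMaxRem_lt_of_forall hpos
  intro s' hs'
  obtain ⟨s, hs, hle⟩ := pvExpandAll_mem hs'
  have := pvMaxRem_mem_le hs
  omega

-- the while loop of Source B: states is the worklist, k the remaining depth counter
def pvBLoop (k : Int) (states : List (String × String)) : List String :=
  if h : k ≠ 0 ∧ states ≠ [] then pvBLoop (k - 1) (pvExpandAll states)
  else if k = 0 then states.map (·.1) else []
termination_by pvMaxRem states
decreasing_by exact pvMaxRem_expand_lt h.2

def get_all_sequences_len_k_alt (word : String) (k : Int) : List String :=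
  pvBLoop k [("", word)]

-- ===== PRECONDITION & SPEC =====
def Spec_get_all_sequences_len_k (word : String) (k : Int) (out : List String) : Prop := out = get_all_sequences_len_k_alt word k
instance (word : String) (k : Int) (out : List String) : Decidable (Spec_get_all_sequences_len_k word k out) := by unfold Spec_get_all_sequences_len_k; infer_instance

-- ===== CLAIM (what is proved, stated in full; the proofs are below) =====
def Claim_equal_get_all_sequences_len_k : Prop := ∀ (word : String) (k : Int), Dom_get_all_sequences_len_k word k → Spec_get_all_sequences_len_k word k (get_all_sequences_len_k word k)

-- ===== LEMMAS AND PROOFS =====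

lemma pvAGo_acc (k : Int) (rest : List Char) : ∀ (pre : List Char) (seen : PySem.Set Char)
    (acc : List String), pvAGo k pre rest seen acc = acc ++ pvAGo k pre rest seen [] := by
  induction rest with
  | nil => intro pre seen acc; simp [pvAGo]
  | cons ch rest' ih =>
    intro pre seen acc
    by_cases hc : PySem.Set.contains seen ch = true
    · rw [pvAGo, pvAGo, if_pos hc, if_pos hc]
      exact ih ..
    · rw [pvAGo, pvAGo, if_neg hc, if_neg hc,
        ih (pre ++ [ch]) _ (acc ++ _), ih (pre ++ [ch]) _ ([] ++ _)]
      simp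

lemma pvExpandGo_acc (p : String) (rest : List Char) : ∀ (pre : List Char)
    (seen : PySem.Set Char) (acc : List (String × String)),
    pvExpandGo p pre rest seen acc = acc ++ pvExpandGo p pre rest seen [] := by
  induction rest with
  | nil => intro pre seen acc; simp [pvExpandGo]
  | cons ch rest' ih =>
    intro pre seen acc
    by_cases hc : PySem.Set.contains seen ch = true
    · rw [pvExpandGo, pvExpandGo, if_pos hc, if_pos hc]
      exact ih ..
    · rw [pvExpandGo, pvExpandGo, if_neg hc, if_neg hc,
        ih (pre ++ [ch]) _ (acc ++ _), ih (pre ++ [ch]) _ ([] ++ _)]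
      simp

lemma pvExpandAll_eq (states : List (String × String)) :
    pvExpandAll states
      = states.flatMap (fun s => pvExpandGo s.1 [] s.2.toList PySem.Set.empty []) := by
  suffices H : ∀ (l : List (String × String)) (acc : List (String × String)),
      l.foldl (fun acc s => pvExpandGo s.1 [] s.2.toList PySem.Set.empty acc) acc
        = acc ++ l.flatMap (fun s => pvExpandGo s.1 [] s.2.toList PySem.Set.empty []) by
    simpa using H states []
  intro l
  induction l with
  | nil => simp
  | cons s l ih =>
    intro acc
    simp only [List.foldl_cons, List.flatMap_cons]
    rw [pvExpandGo_acc, ih]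
    simp

lemma pvKey (k : Int) (rest : List Char) : ∀ (pre : List Char)
    (seen : PySem.Set Char) (p : String),
    (pvExpandGo p pre rest seen []).flatMap
        (fun s' => (get_all_sequences_len_k s'.2 (k - 1)).map
          (fun x => String.ofList (s'.1.toList ++ x.toList)))
      = (pvAGo k pre rest seen []).map (fun x => String.ofList (p.toList ++ x.toList)) := by
  induction rest with
  | nil => intro pre seen p; simp [pvExpandGo, pvAGo]
  | cons ch rest' ih =>
    intro pre seen p
    by_cases hc : PySem.Set.contains seen ch = true
    · rw [pvExpandGo, pvAGo, if_pos hc, if_pos hc]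
      exact ih ..
    · rw [pvExpandGo, pvAGo, if_neg hc, if_neg hc, pvExpandGo_acc, pvAGo_acc]
      simp only [List.nil_append, List.flatMap_append, List.map_append,
        List.flatMap_cons, List.flatMap_nil, List.append_nil, List.map_map]
      rw [ih]
      congr 1
      simp [Function.comp_def, String.toList_ofList]

lemma pvBLoop_eq (k : Int) (states : List (String × String)) :
    pvBLoop k states
      = states.flatMap (fun s => (get_all_sequences_len_k s.2 k).map
          (fun x => String.ofList (s.1.toList ++ x.toList))) := by
  induction k, states using pvBLoop.induct with
  | case1 k states h ih =>
    rw [pvBLoop, dif_pos h, ih, pvExpandAll_eq, List.flatMap_assoc]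
    congr 1
    funext s
    rw [pvKey k, get_all_sequences_len_k, if_neg h.1]
  | case2 states h =>
    rw [pvBLoop, dif_neg h, if_pos rfl]
    have hA : ∀ s : String × String, get_all_sequences_len_k s.2 (0 : Int) = [""] := by
      intro s
      rw [get_all_sequences_len_k]
      simp
    simp only [hA, List.map_cons, List.map_nil, String.toList_empty, List.append_nil,
      String.ofList_toList]
    induction states with
    | nil => simp
    | cons s l ihs => simp [ihs]
  | case3 k states h hk =>
    have hs : states = [] := by
      rcases not_and_or.1 h with h' | h'
      · exact absurd (by simpa using h') hk
      · simpa using h'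
    subst hs
    rw [pvBLoop, dif_neg h, if_neg hk]
    simp

-- ===== VERDICT (by name: the statement is the Claim_ definition above) =====
theorem get_all_sequences_len_k_spec : Claim_equal_get_all_sequences_len_k := by
  intro word k _
  unfold Spec_get_all_sequences_len_k get_all_sequences_len_k_alt
  rw [pvBLoop_eq]
  simp [String.ofList_toList]
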